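-- pv_equiv track=rewrite | github.com/FCoulombeau/fcoulombeau.github.io | cours/TDInfo4.py | listeNombreCarac
-- ===== SOURCE A (Python) =====
-- def listeNombreCarac(chaine):
--     res = []
--     carac = []
--     for c in chaine:
--         if c not in carac:
--             carac.append(c)
--             res.append((c,1))
--         else:
--             i = carac.index(c)
--             res[i] = (res[i][0], res[i][1]+1)
--     return res
-- ===== SOURCE B (Python) =====
-- def listeNombreCarac(chaine):
--     counts = {}
--     for c in chaine:
--         counts[c] = counts.get(c, 0) + 1
--     seen = set()
--     res = []
--     for c in chaine:
--         if c not in seen: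
--             seen.add(c)
--             res.append((c, counts[c]))
--     return res
-- ===== Notes on version B (the rewrite author's own statement) =====
-- stated objective: alternative
-- what changed: A interleaves counting and ordering in one loop with a list membership test and a list.index scan per character; B makes two distinct passes: a dict frequency count, then a seen-set pass emitting (c, counts[c]) at each first occurrence.
import Mathlib
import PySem

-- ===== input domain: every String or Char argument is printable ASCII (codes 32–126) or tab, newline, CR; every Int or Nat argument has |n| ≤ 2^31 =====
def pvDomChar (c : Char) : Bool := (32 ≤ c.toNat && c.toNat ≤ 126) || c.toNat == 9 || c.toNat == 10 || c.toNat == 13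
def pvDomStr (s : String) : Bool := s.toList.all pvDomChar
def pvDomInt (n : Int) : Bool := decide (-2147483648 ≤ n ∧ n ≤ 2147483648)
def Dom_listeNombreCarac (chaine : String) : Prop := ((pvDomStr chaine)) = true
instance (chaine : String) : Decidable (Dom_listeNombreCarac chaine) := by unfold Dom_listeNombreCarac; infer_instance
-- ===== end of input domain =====

-- B replaces A's single interleaved loop (list membership + list.index scan per char) by two
-- passes: a dict frequency count, then a seen-set pass emitting each char at its first occurrence.
-- ===== PORT A =====
def listeNombreCarac (chaine : String) : List (String × Int) :=
  (chaine.toList.foldl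
    (fun (st : List (String × Int) × List Char) c =>
      if c ∉ st.2 then
        (st.1 ++ [(String.singleton c, 1)], st.2 ++ [c])
      else
        let i : Nat := (PySem.List.index? st.2 c).getD 0
        let old := PySem.List.pyGetD st.1 (i : Int) ("", 0)
        (PySem.List.pySetD st.1 (i : Int) (old.1, old.2 + 1), st.2))
    ([], [])).1

-- ===== PORT B =====
def listeNombreCarac_alt (chaine : String) : List (String × Int) :=
  let counts : PySem.Dict Char Int :=
    chaine.toList.foldl (fun d c => d.modify c 0 (· + 1)) PySem.Dict.empty
  (chaine.toList.foldl
    (fun (st : PySem.Set Char × List (String × Int)) c =>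
      if ¬ PySem.Set.contains st.1 c then
        (PySem.Set.add st.1 c, st.2 ++ [(String.singleton c, counts.getD c 0)])
      else st)
    (PySem.Set.empty, [])).2

-- ===== PRECONDITION & SPEC =====
def Spec_listeNombreCarac (chaine : String) (out : List (String × Int)) : Prop := out = listeNombreCarac_alt chaine
instance (chaine : String) (out : List (String × Int)) : Decidable (Spec_listeNombreCarac chaine out) := by unfold Spec_listeNombreCarac; infer_instance

-- ===== CLAIM (what is proved, stated in full; the proofs are below) =====
def Claim_equal_listeNombreCarac : Prop := ∀ (chaine : String), Dom_listeNombreCarac chaine → Spec_listeNombreCarac chaine (listeNombreCarac chaine)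

-- ===== LEMMAS AND PROOFS =====

-- the pair both programs ultimately associate with a distinct character of l
def pvKey (l : List Char) (c : Char) : String × Int := (String.singleton c, (l.count c : Int))

lemma pvKey_append_of_ne (l : List Char) (c d : Char) (h : d ≠ c) :
    pvKey (l ++ [c]) d = pvKey l d := by
  simp [pvKey, List.count_append, Ne.symm h]

lemma dedup_append_singleton (l : List Char) (c : Char) :
    PySem.List.dedup (l ++ [c]) =
      if c ∈ PySem.List.dedup l then PySem.List.dedup l else PySem.List.dedup l ++ [c] := by
  simp only [PySem.List.dedup_eq_ofList, PySem.Set.ofList_eq_foldl, List.foldl_append,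
    List.foldl_cons, List.foldl_nil, PySem.Set.add]
  split_ifs with h₁ h₂ h₂ <;> simp_all

lemma set_map_eq (l : List Char) (c : Char) (k : Nat)
    (hnd : (PySem.List.dedup l).Nodup) (hklt : k < (PySem.List.dedup l).length)
    (hkc : (PySem.List.dedup l)[k] = c) :
    ((PySem.List.dedup l).map (pvKey l)).set k (String.singleton c, (l.count c : Int) + 1)
      = (PySem.List.dedup l).map (pvKey (l ++ [c])) := by
  apply List.ext_getElem (by simp)
  intro j h1 h2
  simp only [List.getElem_set, List.getElem_map]
  have hj2 : j < (PySem.List.dedup l).length := by simpa using h2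
  by_cases hj : k = j
  · subst hj
    rw [if_pos rfl, hkc]
    simp [pvKey, List.count_append]
  · rw [if_neg hj]
    have hne : (PySem.List.dedup l)[j]'hj2 ≠ c := by
      intro h
      exact hj ((hnd.getElem_inj_iff).1 (hkc.trans h.symm))
    exact (pvKey_append_of_ne l c _ hne).symm

lemma invA (l : List Char) :
    l.foldl
      (fun (st : List (String × Int) × List Char) c =>
        if c ∉ st.2 then
          (st.1 ++ [(String.singleton c, 1)], st.2 ++ [c])
        else
          let i : Nat := (PySem.List.index? st.2 c).getD 0
          let old := PySem.List.pyGetD st.1 (i : Int) ("", 0)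
          (PySem.List.pySetD st.1 (i : Int) (old.1, old.2 + 1), st.2))
      ([], []) =
    ((PySem.List.dedup l).map (pvKey l), PySem.List.dedup l) := by
  induction l using List.reverseRecOn with
  | nil => rfl
  | append_singleton l c ih =>
    rw [List.foldl_append, List.foldl_cons, List.foldl_nil, ih]
    by_cases hc : c ∈ PySem.List.dedup l
    · -- seen before: update in place at the index of c
      simp only [hc, not_true_eq_false, if_false]
      obtain ⟨k, hk⟩ := Option.isSome_iff_exists.1 ((PySem.List.index?_isSome_iff _ _).2 hc)
      obtain ⟨hklt, hkc, _⟩ := PySem.List.getElem_of_index?_eq_some hk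
      have hi : (PySem.List.index? (PySem.List.dedup l) c).getD 0 = k := by rw [hk]; rfl
      rw [dedup_append_singleton, if_pos hc]
      simp only [hi, PySem.List.pyGetD_natCast, PySem.List.pySetD_natCast]
      have hget : (((PySem.List.dedup l).map (pvKey l)).getD k ("", 0)) = pvKey l c := by
        rw [List.getD_eq_getElem _ _ (by simpa using hklt)]
        rw [List.getElem_map]
        exact congrArg (pvKey l) hkc
      rw [hget]
      refine Prod.ext ?_ rfl
      simpa [pvKey] using set_map_eq l c k (PySem.List.nodup_dedup l) hklt hkc
    · -- first occurrence: append (c, 1)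
      have hcl : c ∉ l := fun h => hc ((PySem.List.mem_dedup _ _).2 h)
      simp only [hc, not_false_eq_true, if_true]
      rw [dedup_append_singleton, if_neg hc]
      refine Prod.ext ?_ rfl
      show _ ++ _ = List.map _ _
      rw [List.map_append]
      congr 1
      · exact List.map_congr_left fun d hd => (pvKey_append_of_ne l c d
          (fun h => hcl (h ▸ (PySem.List.mem_dedup _ _).1 hd))).symm
      · simp [pvKey, List.count_append, List.count_eq_zero_of_not_mem hcl]

lemma invB (counts : PySem.Dict Char Int) (l : List Char) :
    l.foldl
      (fun (st : PySem.Set Char × List (String × Int)) c =>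
        if ¬ PySem.Set.contains st.1 c then
          (PySem.Set.add st.1 c, st.2 ++ [(String.singleton c, counts.getD c 0)])
        else st)
      (PySem.Set.empty, []) =
    (PySem.List.dedup l, (PySem.List.dedup l).map (fun c => (String.singleton c, counts.getD c 0))) := by
  induction l using List.reverseRecOn with
  | nil => rfl
  | append_singleton l c ih =>
    rw [List.foldl_append, List.foldl_cons, List.foldl_nil, ih,
      dedup_append_singleton]
    by_cases hc : c ∈ PySem.List.dedup l
    · have hcon : PySem.Set.contains (PySem.List.dedup l) c = true :=
        (PySem.Set.contains_iff _ _).2 hc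
      have hcl := (PySem.List.mem_dedup _ _).1 hc
      simp [hcl]
    · have hcon : PySem.Set.contains (PySem.List.dedup l) c = false := by
        rw [Bool.eq_false_iff]
        exact fun h => hc ((PySem.Set.contains_iff _ _).1 h)
      have hcl : c ∉ l := fun h => hc ((PySem.List.mem_dedup _ _).2 h)
      simp [hcl, PySem.Set.add, List.map_append]

lemma counts_getD (l : List Char) (c : Char) :
    (l.foldl (fun d x => d.modify x 0 (· + 1)) PySem.Dict.empty).getD c 0 = (l.count c : Int) := by
  rw [PySem.Dict.getD_foldl_modify_add_one]
  simp [PySem.Dict.getD_empty]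

-- ===== VERDICT (by name: the statement is the Claim_ definition above) =====
theorem listeNombreCarac_spec : Claim_equal_listeNombreCarac := by
  intro chaine _
  unfold Spec_listeNombreCarac listeNombreCarac listeNombreCarac_alt
  rw [invA]
  show _ = (fun counts : PySem.Dict Char Int =>
    (chaine.toList.foldl
      (fun (st : PySem.Set Char × List (String × Int)) c =>
        if ¬ PySem.Set.contains st.1 c then
          (PySem.Set.add st.1 c, st.2 ++ [(String.singleton c, counts.getD c 0)])
        else st)
      (PySem.Set.empty, [])).2)
    (chaine.toList.foldl (fun d c => d.modify c 0 (· + 1)) PySem.Dict.empty)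
  beta_reduce
  rw [invB]
  exact List.map_congr_left fun d _ => by simp [pvKey, counts_getD]
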